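-- pv_equiv track=rewrite | github.com/martydill/Wizardry-6-reverse-engineering | scratch/investigate_ega.py | extract_planes_interleaved
-- ===== SOURCE A (Python) =====
-- def extract_planes_interleaved(data, w, h):
--     # Row Interleaved: Row 0 (P0, P1, P2, P3), Row 1...
--     bytes_per_row_plane = w // 8
--     planes = [[], [], [], []]
--
--     for y in range(h):
--         row_start = y * bytes_per_row_plane * 4
--         for p in range(4):
--             p_start = row_start + p * bytes_per_row_plane
--             p_data = data[p_start : p_start + bytes_per_row_plane]
--             for b in p_data:
--                 for i in range(8):
--                     planes[p].append((b >> (7-i)) & 1)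
--     return planes
-- ===== SOURCE B (Python) =====
-- def extract_planes_interleaved(data, w, h):
--     # Plane-major decomposition: each plane is built independently from its strided
--     # row segments, with bits expanded by a descending-shift extend (no per-bit loop index math).
--     bpr = w // 8
--     stride = 4 * bpr
--
--     def plane(p):
--         bits = []
--         for y in range(h):
--             start = y * stride + p * bpr
--             for b in data[start:start + bpr]:
--                 bits.extend((b >> s) & 1 for s in range(7, -1, -1))
--         return bits
--
--     return [plane(p) for p in range(4)]
-- ===== Notes on version B (the rewrite author's own statement) =====
-- stated objective: alternative
-- what changed: B builds the four planes independently in plane-major order (one pass per plane over its strided row segments, expanding each byte with a descending-shift extend) instead of A's row-major loop that appends bit-by-bit into four shared accumulator lists.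
import Mathlib
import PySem

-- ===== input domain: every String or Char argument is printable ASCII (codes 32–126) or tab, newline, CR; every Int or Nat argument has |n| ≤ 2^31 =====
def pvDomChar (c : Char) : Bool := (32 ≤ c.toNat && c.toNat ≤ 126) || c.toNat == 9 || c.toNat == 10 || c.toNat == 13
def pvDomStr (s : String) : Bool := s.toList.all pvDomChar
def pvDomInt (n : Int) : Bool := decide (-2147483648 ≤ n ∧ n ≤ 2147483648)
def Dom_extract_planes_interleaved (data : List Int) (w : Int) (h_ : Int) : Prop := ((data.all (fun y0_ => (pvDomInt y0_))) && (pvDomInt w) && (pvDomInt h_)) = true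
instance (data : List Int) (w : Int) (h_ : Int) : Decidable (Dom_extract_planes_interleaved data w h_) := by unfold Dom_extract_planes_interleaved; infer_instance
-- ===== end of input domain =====

-- B rebuilds the output plane-major (each of the 4 planes computed independently from its
-- strided row segments, bits produced by a descending-shift map) instead of A's row-major
-- mutation of four shared accumulators; objective: alternative decomposition, same cost.

-- ===== PORT A =====
-- planes[p].append(x) on the 4-element list of accumulators
def pvAppendAt (planes : List (List Int)) (p : Int) (x : Int) : List (List Int) :=
  planes.set p.toNat ((planes.getD p.toNat []) ++ [x])

-- b >> k for a Nat shift count (pins Lean's Int-by-Nat shift instance)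
def pvShift (b : Int) (k : Nat) : Int := b >>> k

-- (b >> (7-i)) & 1
def pvBitA (b i : Int) : Int := PySem.Int.band (pvShift b (7 - i).toNat) 1

def extract_planes_interleaved (data : List Int) (w : Int) (h_ : Int) : List (List Int) :=
  let bytes_per_row_plane := PySem.Int.floordiv w 8
  let planes : List (List Int) := [[], [], [], []]
  (PySem.List.pyRange 0 h_ 1).foldl (fun planes y =>
    let row_start := y * bytes_per_row_plane * 4
    (PySem.List.pyRange 0 4 1).foldl (fun planes p =>
      let p_start := row_start + p * bytes_per_row_plane
      let p_data := PySem.List.slice data (some p_start) (some (p_start + bytes_per_row_plane))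
      p_data.foldl (fun planes b =>
        (PySem.List.pyRange 0 8 1).foldl (fun planes i =>
          pvAppendAt planes p (pvBitA b i)) planes) planes) planes) planes

-- ===== PORT B =====
-- the generator expression ((b >> s) & 1 for s in range(7, -1, -1)), as the list it yields
def pvBitsB (b : Int) : List Int :=
  (PySem.List.pyRange 7 (-1) (-1)).map (fun s => PySem.Int.band (pvShift b s.toNat) 1)

def extract_planes_interleaved_alt (data : List Int) (w : Int) (h_ : Int) : List (List Int) :=
  let bpr := PySem.Int.floordiv w 8
  let stride := 4 * bpr
  let plane := fun (p : Int) =>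
    (PySem.List.pyRange 0 h_ 1).foldl (fun bits y =>
      let start := y * stride + p * bpr
      (PySem.List.slice data (some start) (some (start + bpr))).foldl (fun bits b =>
        bits ++ pvBitsB b) bits) []
  (PySem.List.pyRange 0 4 1).map plane

-- ===== PRECONDITION & SPEC =====
def Spec_extract_planes_interleaved (data : List Int) (w : Int) (h_ : Int) (out : List (List Int)) : Prop := out = extract_planes_interleaved_alt data w h_
instance (data : List Int) (w : Int) (h_ : Int) (out : List (List Int)) : Decidable (Spec_extract_planes_interleaved data w h_ out) := by unfold Spec_extract_planes_interleaved; infer_instance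

-- ===== CLAIM (what is proved, stated in full; the proofs are below) =====
def Claim_equal_extract_planes_interleaved : Prop := ∀ (data : List Int) (w : Int) (h_ : Int), Dom_extract_planes_interleaved data w h_ → Spec_extract_planes_interleaved data w h_ (extract_planes_interleaved data w h_)

-- ===== LEMMAS AND PROOFS =====

-- the bits contributed by plane p at row y
def pvRow (data : List Int) (bpr p y : Int) : List Int :=
  (PySem.List.slice data (some (y * bpr * 4 + p * bpr)) (some (y * bpr * 4 + p * bpr + bpr))).flatMap pvBitsB

lemma pvBitsB_eq (b : Int) :
    pvBitsB b = [pvBitA b 0, pvBitA b 1, pvBitA b 2, pvBitA b 3,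
                 pvBitA b 4, pvBitA b 5, pvBitA b 6, pvBitA b 7] := by
  have hr2 : PySem.List.pyRange 7 (-1) (-1) = [7, 6, 5, 4, 3, 2, 1, 0] := by decide
  simp [pvBitsB, pvBitA, hr2]

lemma pvBitLoop (q0 q1 q2 q3 : List Int) (p b : Int)
    (hp : p = 0 ∨ p = 1 ∨ p = 2 ∨ p = 3) :
    (PySem.List.pyRange 0 8 1).foldl (fun planes i =>
        pvAppendAt planes p (pvBitA b i)) [q0, q1, q2, q3]
      = (([q0, q1, q2, q3] : List (List Int)).set p.toNat
          (([q0, q1, q2, q3].getD p.toNat []) ++ pvBitsB b)) := by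
  have hr : PySem.List.pyRange 0 8 1 = [0, 1, 2, 3, 4, 5, 6, 7] := by decide
  rcases hp with h | h | h | h <;> subst h <;>
    simp [hr, pvBitsB_eq, pvAppendAt, List.foldl]

lemma pvByteLoop (L : List Int) (q0 q1 q2 q3 : List Int) (p : Int)
    (hp : p = 0 ∨ p = 1 ∨ p = 2 ∨ p = 3) :
    L.foldl (fun planes b =>
        (PySem.List.pyRange 0 8 1).foldl (fun planes i =>
          pvAppendAt planes p (pvBitA b i)) planes) [q0, q1, q2, q3]
      = (([q0, q1, q2, q3] : List (List Int)).set p.toNat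
          (([q0, q1, q2, q3].getD p.toNat []) ++ L.flatMap pvBitsB)) := by
  have t0 : (0 : Int).toNat = 0 := rfl
  have t1 : (1 : Int).toNat = 1 := rfl
  have t2 : (2 : Int).toNat = 2 := rfl
  have t3 : (3 : Int).toNat = 3 := rfl
  rcases hp with h | h | h | h <;> subst h <;>
  · induction L generalizing q0 q1 q2 q3 with
    | nil => simp
    | cons b L ih =>
      rw [List.foldl_cons, pvBitLoop q0 q1 q2 q3 _ b (by simp)]
      simp only [t0, t1, t2, t3, List.set, List.getD, List.getElem?_cons_zero,
        List.getElem?_cons_succ, Option.getD_some] at *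
      rw [ih]
      simp [List.flatMap_cons]

lemma pvRowLoop (data : List Int) (bpr y : Int) (q0 q1 q2 q3 : List Int) :
    (PySem.List.pyRange 0 4 1).foldl (fun planes p =>
        (PySem.List.slice data (some (y * bpr * 4 + p * bpr)) (some (y * bpr * 4 + p * bpr + bpr))).foldl
          (fun planes b =>
            (PySem.List.pyRange 0 8 1).foldl (fun planes i =>
              pvAppendAt planes p (pvBitA b i)) planes) planes) [q0, q1, q2, q3]
      = [q0 ++ pvRow data bpr 0 y, q1 ++ pvRow data bpr 1 y,
         q2 ++ pvRow data bpr 2 y, q3 ++ pvRow data bpr 3 y] := by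
  have t0 : (0 : Int).toNat = 0 := rfl
  have t1 : (1 : Int).toNat = 1 := rfl
  have t2 : (2 : Int).toNat = 2 := rfl
  have t3 : (3 : Int).toNat = 3 := rfl
  have hr : PySem.List.pyRange 0 4 1 = [0, 1, 2, 3] := by decide
  rw [hr]
  simp only [List.foldl_cons, List.foldl_nil]
  rw [pvByteLoop _ _ _ _ _ 0 (by simp)]
  simp only [t0, List.set, List.getD, List.getElem?_cons_zero, Option.getD_some]
  rw [pvByteLoop _ _ _ _ _ 1 (by simp)]
  simp only [t1, List.set, List.getD, List.getElem?_cons_succ, List.getElem?_cons_zero,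
    Option.getD_some]
  rw [pvByteLoop _ _ _ _ _ 2 (by simp)]
  simp only [t2, List.set, List.getD, List.getElem?_cons_succ, List.getElem?_cons_zero,
    Option.getD_some]
  rw [pvByteLoop _ _ _ _ _ 3 (by simp)]
  simp [t3, pvRow]

lemma pvYLoop (data : List Int) (bpr : Int) (ys : List Int) (q0 q1 q2 q3 : List Int) :
    ys.foldl (fun planes y =>
        (PySem.List.pyRange 0 4 1).foldl (fun planes p =>
          (PySem.List.slice data (some (y * bpr * 4 + p * bpr)) (some (y * bpr * 4 + p * bpr + bpr))).foldl
            (fun planes b =>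
              (PySem.List.pyRange 0 8 1).foldl (fun planes i =>
                pvAppendAt planes p (pvBitA b i)) planes) planes) planes)
      [q0, q1, q2, q3]
      = [q0 ++ ys.flatMap (pvRow data bpr 0), q1 ++ ys.flatMap (pvRow data bpr 1),
         q2 ++ ys.flatMap (pvRow data bpr 2), q3 ++ ys.flatMap (pvRow data bpr 3)] := by
  induction ys generalizing q0 q1 q2 q3 with
  | nil => simp
  | cons y ys ih =>
    rw [List.foldl_cons, pvRowLoop data bpr y q0 q1 q2 q3, ih]
    simp [List.flatMap_cons]

lemma pvPlaneB (data : List Int) (bpr h_ p : Int) :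
    (PySem.List.pyRange 0 h_ 1).foldl (fun bits y =>
        (PySem.List.slice data (some (y * (4 * bpr) + p * bpr)) (some (y * (4 * bpr) + p * bpr + bpr))).foldl
          (fun bits b => bits ++ pvBitsB b) bits) []
      = (PySem.List.pyRange 0 h_ 1).flatMap (pvRow data bpr p) := by
  have hstep : ∀ (acc : List Int) (y : Int),
      (PySem.List.slice data (some (y * (4 * bpr) + p * bpr)) (some (y * (4 * bpr) + p * bpr + bpr))).foldl
          (fun bits b => bits ++ pvBitsB b) acc
        = acc ++ pvRow data bpr p y := by
    intro acc y
    have hmul : y * (4 * bpr) + p * bpr = y * bpr * 4 + p * bpr := by ring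
    rw [hmul, pvRow]
    exact PySem.List.foldl_append_eq_flatMap pvBitsB _ _
  calc (PySem.List.pyRange 0 h_ 1).foldl (fun bits y =>
        (PySem.List.slice data (some (y * (4 * bpr) + p * bpr)) (some (y * (4 * bpr) + p * bpr + bpr))).foldl
          (fun bits b => bits ++ pvBitsB b) bits) []
      = (PySem.List.pyRange 0 h_ 1).foldl (fun bits y => bits ++ pvRow data bpr p y) [] :=
        PySem.List.foldl_congr_mem _ _ _ _ (fun acc y _ => hstep acc y)
    _ = (PySem.List.pyRange 0 h_ 1).flatMap (pvRow data bpr p) := by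
        simpa using PySem.List.foldl_append_eq_flatMap (pvRow data bpr p) (PySem.List.pyRange 0 h_ 1) []

-- ===== VERDICT (by name: the statement is the Claim_ definition above) =====
theorem extract_planes_interleaved_spec : Claim_equal_extract_planes_interleaved := by
  intro data w h_ _
  unfold Spec_extract_planes_interleaved extract_planes_interleaved extract_planes_interleaved_alt
  have hr4 : PySem.List.pyRange 0 4 1 = [0, 1, 2, 3] := by decide
  rw [pvYLoop data (PySem.Int.floordiv w 8) (PySem.List.pyRange 0 h_ 1) [] [] [] []]
  conv_rhs => rw [hr4]
  simp only [List.map_cons, List.map_nil, pvPlaneB, List.nil_append]
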